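-- pv_equiv track=rewrite | github.com/monicaghavalyan/Data-Structures-in-python | algorithms.py | job_sequencing_problem_greedy_rec_helper
-- ===== SOURCE A (Python) =====
-- def job_sequencing_problem_greedy_rec_helper(tasks, time, schedule):
--     if time == 0 or not tasks:
--         return 0
--     tasks = sorted(tasks, key=lambda x: x[2], reverse=True)
--     first_task = tasks[0]
--     deadline, profit = first_task[1], first_task[2]
--     if deadline <= time:
--         for i in range(deadline - 1, -1, -1):
--             if schedule[i] == 0:
--                 schedule[i] = 1
--                 return job_sequencing_problem_greedy_rec_helper(tasks[1:], time, schedule) + profit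
--     else:
--         for i in range(time - 1, -1, -1):
--             if schedule[i] == 0:
--                 schedule[i] = 1
--                 return job_sequencing_problem_greedy_rec_helper(tasks[1:], time, schedule) + profit
--     return job_sequencing_problem_greedy_rec_helper(tasks[1:], time, schedule)
-- ===== SOURCE B (Python) =====
-- def job_sequencing_problem_greedy_rec_helper(tasks, time, schedule):
--     # Return-value equivalent to A; unlike A it does not mutate `schedule`.
--     if time == 0:
--         return 0
--     free = [i for i in range(len(schedule)) if schedule[i] == 0]
--     total = 0
--     for task in sorted(tasks, key=lambda x: x[2], reverse=True):
--         m = min(task[1], time)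
--         lo, hi = 0, len(free)
--         while lo < hi:
--             mid = (lo + hi) // 2
--             if free[mid] < m:
--                 lo = mid + 1
--             else:
--                 hi = mid
--         if lo > 0:
--             del free[lo - 1]
--             total += task[2]
--     return total
-- ===== Notes on version B (the rewrite author's own statement) =====
-- stated objective: alternative
-- what changed: A re-sorts the remaining tasks on every recursive call and scans the schedule array downward for a free slot per task; B sorts once, builds the ascending free-slot list once, and picks each task's latest free slot by binary search on that list (B does not mutate `schedule`; the equivalence is about the return value).
import Mathlib
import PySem

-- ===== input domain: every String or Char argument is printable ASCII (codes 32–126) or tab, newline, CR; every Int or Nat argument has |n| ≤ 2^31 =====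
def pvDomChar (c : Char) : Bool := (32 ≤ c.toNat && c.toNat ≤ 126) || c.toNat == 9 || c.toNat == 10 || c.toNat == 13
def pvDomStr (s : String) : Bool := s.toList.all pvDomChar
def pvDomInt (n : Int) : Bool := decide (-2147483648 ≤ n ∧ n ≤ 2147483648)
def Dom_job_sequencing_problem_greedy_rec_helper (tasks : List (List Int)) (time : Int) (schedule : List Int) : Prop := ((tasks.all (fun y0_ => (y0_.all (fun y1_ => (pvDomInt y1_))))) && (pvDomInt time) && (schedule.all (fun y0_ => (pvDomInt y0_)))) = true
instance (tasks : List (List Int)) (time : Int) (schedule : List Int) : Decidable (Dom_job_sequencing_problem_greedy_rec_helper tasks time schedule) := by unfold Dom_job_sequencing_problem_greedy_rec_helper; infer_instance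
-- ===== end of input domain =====

-- B replaces A's re-sort-per-recursive-call plus downward schedule scan with one sort and a
-- maintained ascending free-slot list queried by binary search; A fills `schedule` in place,
-- B does not mutate it — the equivalence proved here is about the return value only.

-- ===== PORT A =====
-- the inner 'for i in range(k-1, -1, -1): if schedule[i] == 0: …' loop of A:
-- scans indices k-1, k-2, …, 0 and returns the first i with schedule[i] == 0 (none if no such i)
def pvScanA (schedule : List Int) : Nat → Option Nat
  | 0 => none
  | k + 1 =>
    if PySem.List.pyGetD schedule (k : Int) 0 = 0 then some k
    else pvScanA schedule k

def job_sequencing_problem_greedy_rec_helper (tasks : List (List Int)) (time : Int) (schedule : List Int) : Int :=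
  if h : time = 0 ∨ tasks = [] then 0
  else
    -- tasks = sorted(tasks, key=lambda x: x[2], reverse=True); x[2] read as pyGetD (raises outside Pre_)
    let ts := PySem.List.sorted tasks (fun x => PySem.List.pyGetD x 2 0) true
    let first := PySem.List.pyGetD ts 0 []          -- tasks[0]
    let deadline := PySem.List.pyGetD first 1 0     -- first_task[1]
    let profit := PySem.List.pyGetD first 2 0       -- first_task[2]
    if deadline ≤ time then
      match pvScanA schedule deadline.toNat with    -- range(deadline-1, -1, -1) runs deadline.toNat times
      | some i => job_sequencing_problem_greedy_rec_helper ts.tail time (schedule.set i 1) + profit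
      | none   => job_sequencing_problem_greedy_rec_helper ts.tail time schedule
    else
      match pvScanA schedule time.toNat with        -- range(time-1, -1, -1) runs time.toNat times
      | some i => job_sequencing_problem_greedy_rec_helper ts.tail time (schedule.set i 1) + profit
      | none   => job_sequencing_problem_greedy_rec_helper ts.tail time schedule
termination_by tasks.length
decreasing_by
  all_goals
    push_neg at h
    have hlen : (PySem.List.sorted tasks (fun x => PySem.List.pyGetD x 2 0) true).length = tasks.length :=
      PySem.List.length_sorted ..
    have hne : tasks ≠ [] := h.2
    have : 0 < tasks.length := List.length_pos_iff.mpr hne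
    simp only [List.length_tail, hlen]
    omega

-- ===== PORT B =====
-- the hand-written binary search of Source B: while lo < hi: mid=(lo+hi)//2; lo/hi updated.
-- The while loop is ported with a fuel counter (hi - lo strictly decreases) so it stays
-- structurally recursive; pvBisectB supplies exactly enough fuel.
def pvBisectGo (free : List Int) (m : Int) : Nat → Nat → Nat → Nat
  | 0, lo, _ => lo
  | fuel + 1, lo, hi =>
    if lo < hi then
      let mid := (lo + hi) / 2
      if PySem.List.pyGetD free (mid : Int) 0 < m then pvBisectGo free m fuel (mid + 1) hi
      else pvBisectGo free m fuel lo mid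
    else lo

def pvBisectB (free : List Int) (m : Int) (lo hi : Nat) : Nat :=
  pvBisectGo free m (hi - lo) lo hi

def job_sequencing_problem_greedy_rec_helper_alt (tasks : List (List Int)) (time : Int) (schedule : List Int) : Int :=
  if time = 0 then 0
  else
    -- free = [i for i in range(len(schedule)) if schedule[i] == 0]
    let free := (PySem.List.pyRange 0 (schedule.length : Int) 1).filter
      (fun i => PySem.List.pyGetD schedule i 0 == 0)
    -- for task in sorted(tasks, key=lambda x: x[2], reverse=True): …
    let r := (PySem.List.sorted tasks (fun x => PySem.List.pyGetD x 2 0) true).foldl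
      (fun (st : List Int × Int) task =>
        let m := min (PySem.List.pyGetD task 1 0) time
        let lo := pvBisectB st.1 m 0 st.1.length
        if 0 < lo then (st.1.eraseIdx (lo - 1), st.2 + PySem.List.pyGetD task 2 0)
        else st)
      (free, 0)
    r.2

-- ===== PRECONDITION & SPEC =====
-- Pre_ excludes exactly the inputs on which the Python A raises: with time ≠ 0 and tasks ≠ [],
-- every task needs length ≥ 3 (else IndexError in the sort key x[2] / in first_task[1]) and
-- min(deadline, time) ≤ len(schedule) (else the downward scan starts at an out-of-range index).
def Pre_job_sequencing_problem_greedy_rec_helper (tasks : List (List Int)) (time : Int) (schedule : List Int) : Prop :=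
  time = 0 ∨ tasks = [] ∨
    ∀ t ∈ tasks, 3 ≤ t.length ∧ min (PySem.List.pyGetD t 1 0) time ≤ (schedule.length : Int)
instance (tasks : List (List Int)) (time : Int) (schedule : List Int) : Decidable (Pre_job_sequencing_problem_greedy_rec_helper tasks time schedule) := by unfold Pre_job_sequencing_problem_greedy_rec_helper; infer_instance

def pvWitness_job_sequencing_problem_greedy_rec_helper : List (List Int) × Int × List Int :=
  ([[1, 1, 5], [2, 2, 3]], 2, [0, 0])

def Spec_job_sequencing_problem_greedy_rec_helper (tasks : List (List Int)) (time : Int) (schedule : List Int) (out : Int) : Prop := out = job_sequencing_problem_greedy_rec_helper_alt tasks time schedule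
instance (tasks : List (List Int)) (time : Int) (schedule : List Int) (out : Int) : Decidable (Spec_job_sequencing_problem_greedy_rec_helper tasks time schedule out) := by unfold Spec_job_sequencing_problem_greedy_rec_helper; infer_instance

-- ===== CLAIM (what is proved, stated in full; the proofs are below) =====
def Claim_equal_job_sequencing_problem_greedy_rec_helper : Prop := ∀ (tasks : List (List Int)) (time : Int) (schedule : List Int), Dom_job_sequencing_problem_greedy_rec_helper tasks time schedule → Pre_job_sequencing_problem_greedy_rec_helper tasks time schedule → Spec_job_sequencing_problem_greedy_rec_helper tasks time schedule (job_sequencing_problem_greedy_rec_helper tasks time schedule)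
-- ===== LEMMAS AND PROOFS =====

-- the free-slot list of a schedule, exactly as B builds it
def pvFree (schedule : List Int) : List Int :=
  (PySem.List.pyRange 0 (schedule.length : Int) 1).filter
    (fun i => PySem.List.pyGetD schedule i 0 == 0)

-- B's per-task step function (definitionally the fold body of the B port)
def pvStepB (time : Int) (st : List Int × Int) (task : List Int) : List Int × Int :=
  let m := min (PySem.List.pyGetD task 1 0) time
  let lo := pvBisectB st.1 m 0 st.1.length
  if 0 < lo then (st.1.eraseIdx (lo - 1), st.2 + PySem.List.pyGetD task 2 0)
  else st

lemma pvFree_mem (s : List Int) (x : Int) :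
    x ∈ pvFree s ↔ 0 ≤ x ∧ x < (s.length : Int) ∧ PySem.List.pyGetD s x 0 = 0 := by
  simp [pvFree, List.mem_filter, PySem.List.mem_pyRange_one, and_assoc]

lemma pvFree_pairwise (s : List Int) : (pvFree s).Pairwise (· < ·) := by
  exact List.Pairwise.filter _ (PySem.List.pairwise_lt_pyRange_one ..)

lemma asc_getElem_lt_iff (free : List Int) (hs : free.Pairwise (· < ·)) (m : Int)
    (idx : Nat) (h : idx < free.length) :
    (free[idx] < m ↔ idx < free.countP (fun x => decide (x < m))) := by
  induction free generalizing idx with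
  | nil => simp at h
  | cons a l ih =>
    rcases List.pairwise_cons.mp hs with ⟨ha, hl⟩
    by_cases ham : a < m
    · have : (a :: l).countP (fun x => decide (x < m)) = l.countP (fun x => decide (x < m)) + 1 := by
        simp [List.countP_cons, ham]
      rw [this]
      cases idx with
      | zero => simpa using by omega
      | succ p =>
        have hp : p < l.length := by simpa using h
        simpa using (ih hl p hp).trans (by omega)
    · have hc0 : l.countP (fun x => decide (x < m)) = 0 := by
        rw [List.countP_eq_zero]
        intro x hx
        have := ha x hx
        simp; omega
      have : (a :: l).countP (fun x => decide (x < m)) = 0 := by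
        simp [List.countP_cons, ham, hc0]
      rw [this]
      cases idx with
      | zero => simpa using by omega
      | succ p =>
        have hp : p < l.length := by simpa using h
        have : m ≤ l[p] := by
          have := ha l[p] (by simp)
          omega
        simp only [List.getElem_cons_succ]
        omega

lemma nodup_eraseIdx_eq_filter (l : List Int) (p : Nat) (h : p < l.length) (hnd : l.Nodup) :
    l.eraseIdx p = l.filter (fun x => x ≠ l[p]) := by
  induction l generalizing p with
  | nil => simp at h
  | cons a t ih =>
    rcases List.nodup_cons.mp hnd with ⟨hna, hnt⟩
    cases p with
    | zero =>
      simp only [List.eraseIdx_cons_zero, List.getElem_cons_zero, List.filter_cons]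
      rw [if_neg (by simp)]
      symm
      rw [List.filter_eq_self]
      intro x hx
      simpa using fun (hxa : x = a) => hna (hxa ▸ hx)
    | succ q =>
      have hq : q < t.length := by simpa using h
      simp only [List.eraseIdx_cons_succ, List.getElem_cons_succ, List.filter_cons]
      have : a ≠ t[q] := fun hq' => hna (hq' ▸ (List.getElem_mem hq))
      simp [this, ih q hq hnt]

-- binary search computes countP (· < m) on an ascending list
lemma pvBisectGo_eq_countP (free : List Int) (hs : free.Pairwise (· < ·)) (m : Int) :
    ∀ (fuel lo hi : Nat), hi - lo ≤ fuel → lo ≤ free.countP (fun x => decide (x < m)) →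
    free.countP (fun x => decide (x < m)) ≤ hi → hi ≤ free.length →
    pvBisectGo free m fuel lo hi = free.countP (fun x => decide (x < m)) := by
  intro fuel
  induction fuel with
  | zero =>
    intro lo hi hfuel hlo hhi _
    simp only [pvBisectGo]
    omega
  | succ fuel ih =>
    intro lo hi hfuel hlo hhi hlen
    rw [pvBisectGo]
    by_cases hlt : lo < hi
    · rw [if_pos hlt]
      have hmidlen : (lo + hi) / 2 < free.length := by omega
      have hiff := asc_getElem_lt_iff free hs m ((lo + hi) / 2) hmidlen
      by_cases hm : PySem.List.pyGetD free (((lo + hi) / 2 : Nat) : Int) 0 < m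
      · have hm' : free[(lo + hi) / 2] < m := by
          rw [PySem.List.pyGetD_natCast, List.getD_eq_getElem _ _ hmidlen] at hm
          exact hm
        rw [if_pos hm]
        have hmc := hiff.mp hm'
        apply ih <;> omega
      · have hm' : ¬ free[(lo + hi) / 2] < m := by
          rw [PySem.List.pyGetD_natCast, List.getD_eq_getElem _ _ hmidlen] at hm
          exact hm
        rw [if_neg hm]
        have hmc : free.countP (fun x => decide (x < m)) ≤ (lo + hi) / 2 := by
          by_contra hcm
          exact hm' ((hiff.mpr (by omega)))
        apply ih <;> omega
    · rw [if_neg hlt]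
      omega

lemma pvBisectB_eq_countP (free : List Int) (hs : free.Pairwise (· < ·)) (m : Int)
    (lo hi : Nat) (hlo : lo ≤ free.countP (fun x => decide (x < m)))
    (hhi : free.countP (fun x => decide (x < m)) ≤ hi) (hlen : hi ≤ free.length) :
    pvBisectB free m lo hi = free.countP (fun x => decide (x < m)) :=
  pvBisectGo_eq_countP free hs m (hi - lo) lo hi le_rfl hlo hhi hlen

lemma pvScanA_spec (s : List Int) (k : Nat) :
    (pvScanA s k = none ∧ ∀ i < k, PySem.List.pyGetD s (i : Int) 0 ≠ 0) ∨
    (∃ j, pvScanA s k = some j ∧ j < k ∧ PySem.List.pyGetD s (j : Int) 0 = 0 ∧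
      ∀ i, j < i → i < k → PySem.List.pyGetD s (i : Int) 0 ≠ 0) := by
  induction k with
  | zero => left; exact ⟨rfl, by omega⟩
  | succ k ih =>
    by_cases hk : PySem.List.pyGetD s (k : Int) 0 = 0
    · right
      exact ⟨k, by rw [show pvScanA s (k+1) = if PySem.List.pyGetD s (k:Int) 0 = 0 then some k else pvScanA s k from rfl, if_pos hk], by omega, hk, by omega⟩
    · rcases ih with ⟨hn, hall⟩ | ⟨j, hj, hjk, hj0, hmax⟩
      · left
        refine ⟨by rw [show pvScanA s (k+1) = if PySem.List.pyGetD s (k:Int) 0 = 0 then some k else pvScanA s k from rfl, if_neg hk]; exact hn, ?_⟩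
        intro i hi
        rcases Nat.lt_succ_iff_lt_or_eq.mp hi with h | h
        · exact hall i h
        · subst h; exact hk
      · right
        refine ⟨j, by rw [show pvScanA s (k+1) = if PySem.List.pyGetD s (k:Int) 0 = 0 then some k else pvScanA s k from rfl, if_neg hk]; exact hj, by omega, hj0, ?_⟩
        intro i hji hik
        rcases Nat.lt_succ_iff_lt_or_eq.mp hik with h | h
        · exact hmax i hji h
        · subst h; exact hk

lemma scan_none_of_countP_zero (s : List Int) (m : Int) (hm : m ≤ (s.length : Int))
    (hc : (pvFree s).countP (fun x => decide (x < m)) = 0) :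
    pvScanA s m.toNat = none := by
  rcases pvScanA_spec s m.toNat with ⟨hn, _⟩ | ⟨j, hj, hjk, hj0, _⟩
  · exact hn
  · exfalso
    have hjm : ((j : Int)) < m := by omega
    have hmem : (j : Int) ∈ pvFree s := (pvFree_mem s j).mpr ⟨by omega, by omega, hj0⟩
    have := List.countP_eq_zero.mp hc _ hmem
    simp [hjm] at this

lemma scan_some_asc (s : List Int) (free : List Int) (m : Int) (hm : m ≤ (s.length : Int))
    (hmem : ∀ x, x ∈ free ↔ 0 ≤ x ∧ x < (s.length : Int) ∧ PySem.List.pyGetD s x 0 = 0)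
    (hpw : free.Pairwise (· < ·))
    (hc : 0 < free.countP (fun x => decide (x < m)))
    (hlt : free.countP (fun x => decide (x < m)) - 1 < free.length) :
    pvScanA s m.toNat =
      some ((free[free.countP (fun x => decide (x < m)) - 1]).toNat) := by
  set c := free.countP (fun x => decide (x < m)) with hcdef
  have hjlt : free[c-1] < m := (asc_getElem_lt_iff free hpw m (c-1) hlt).mpr (by omega)
  have hjmem : free[c-1] ∈ free := List.getElem_mem hlt
  obtain ⟨hge0, hlen2, hzero⟩ := (hmem free[c-1]).mp hjmem
  rcases pvScanA_spec s m.toNat with ⟨_, hall⟩ | ⟨j, hj, hjk, hj0, hmax⟩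
  · exfalso
    exact hall (free[c-1]).toNat (by omega) (by
      have h' : ((free[c-1]).toNat : Int) = free[c-1] := by omega
      rw [h']; exact hzero)
  · have hjm : ((j:Int)) < m := by omega
    have hjfree : (j : Int) ∈ free := (hmem j).mpr ⟨by omega, by omega, hj0⟩
    have h1 : (j : Int) ≤ free[c-1] := by
      rcases List.mem_iff_getElem.mp hjfree with ⟨p, hp, hpj⟩
      have hpc : p < c := (asc_getElem_lt_iff free hpw m p hp).mp (by rw [hpj]; exact hjm)
      rcases Nat.lt_or_ge p (c-1) with h | h
      · have hlt2 := List.pairwise_iff_getElem.mp hpw p (c-1) hp hlt h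
        rw [hpj] at hlt2
        omega
      · have hpe : p = c - 1 := by omega
        subst hpe
        exact le_of_eq hpj.symm
    have h2 : free[c-1] ≤ (j : Int) := by
      by_contra hgt
      push_neg at hgt
      have hne := hmax (free[c-1]).toNat (by omega) (by omega)
      exact hne (by
        have hcast : (((free[c-1]).toNat : Int)) = free[c-1] := by omega
        rw [hcast]; exact hzero)
    have hje : (j : Int) = free[c-1] := le_antisymm h1 h2
    rw [hj]
    show some j = some ((free[c-1]'hlt).toNat)
    congr 1
    omega

lemma scan_some_of_countP_pos (s : List Int) (m : Int) (hm : m ≤ (s.length : Int))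
    (hc : 0 < (pvFree s).countP (fun x => decide (x < m)))
    (hlt : (pvFree s).countP (fun x => decide (x < m)) - 1 < (pvFree s).length) :
    pvScanA s m.toNat =
      some ((pvFree s)[(pvFree s).countP (fun x => decide (x < m)) - 1]).toNat :=
  scan_some_asc s (pvFree s) m hm (fun x => pvFree_mem s x) (pvFree_pairwise s) hc hlt

lemma pvFree_set_gen (s : List Int) (j : Int) (h0 : 0 ≤ j) (hjlen : j < (s.length : Int)) :
    pvFree (s.set j.toNat 1) = (pvFree s).filter (fun x => x ≠ j) := by
  unfold pvFree
  rw [List.filter_filter, List.length_set]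
  apply List.filter_congr
  intro i hi
  obtain ⟨hi0, hilen⟩ := (PySem.List.mem_pyRange_one).mp hi
  have hitn : i.toNat < s.length := by omega
  rw [PySem.List.pyGetD_of_nonneg _ _ hi0, PySem.List.pyGetD_of_nonneg _ _ hi0,
    List.getD_eq_getElem _ _ (by simpa using hitn), List.getD_eq_getElem _ _ hitn,
    List.getElem_set]
  by_cases hij : j.toNat = i.toNat
  · have hie : i = j := by omega
    subst hie
    simp [hij]
  · have hne : ¬ i = j := by omega
    simp [hij, hne]

lemma pvFree_set (s : List Int) (c1 : Nat) (h : c1 < (pvFree s).length) :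
    pvFree (s.set ((pvFree s)[c1]).toNat 1) = (pvFree s).eraseIdx c1 := by
  obtain ⟨hge0, hlen, hzero⟩ := (pvFree_mem s (pvFree s)[c1]).mp (List.getElem_mem h)
  have hnd : (pvFree s).Nodup := (pvFree_pairwise s).imp (fun hab => ne_of_lt hab)
  rw [nodup_eraseIdx_eq_filter _ _ h hnd, pvFree_set_gen s _ hge0 hlen]

lemma foldB_acc (time : Int) (ts : List (List Int)) (f : List Int) (c : Int) :
    ts.foldl (pvStepB time) (f, c) =
      ((ts.foldl (pvStepB time) (f, 0)).1, c + (ts.foldl (pvStepB time) (f, 0)).2) := by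
  induction ts generalizing f c with
  | nil => simp
  | cons t rest ih =>
    simp only [List.foldl_cons]
    by_cases h0 : 0 < pvBisectB f (min (PySem.List.pyGetD t 1 0) time) 0 f.length
    · simp only [pvStepB, if_pos h0]
      rw [ih, ih (f.eraseIdx _) (0 + PySem.List.pyGetD t 2 0)]
      simp [add_assoc]
    · simp only [pvStepB, if_neg h0]
      exact ih f c

lemma core (time : Int) : ∀ (ts : List (List Int)) (s : List Int),
    time ≠ 0 →
    ts.Pairwise (fun a b => PySem.List.pyGetD b 2 0 ≤ PySem.List.pyGetD a 2 0) →
    (∀ t ∈ ts, min (PySem.List.pyGetD t 1 0) time ≤ (s.length : Int)) →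
    job_sequencing_problem_greedy_rec_helper ts time s =
      (ts.foldl (pvStepB time) (pvFree s, 0)).2 := by
  intro ts
  induction ts with
  | nil =>
    intro s ht _ _
    rw [job_sequencing_problem_greedy_rec_helper]
    simp
  | cons t rest ih =>
    intro s ht hpw hmle
    have hguard : ¬ (time = 0 ∨ t :: rest = []) := by simp [ht]
    rw [job_sequencing_problem_greedy_rec_helper, dif_neg hguard]
    have hsorted : PySem.List.sorted (t :: rest) (fun x => PySem.List.pyGetD x 2 0) true = t :: rest :=
      PySem.List.sorted_rev_eq_self_of_pairwise _ _ hpw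
    simp only [hsorted]
    have hfirst : PySem.List.pyGetD (t :: rest) 0 [] = t := by
      rw [show ((0:Int)) = ((0:Nat):Int) from rfl, PySem.List.pyGetD_natCast]
      rfl
    simp only [hfirst, List.tail_cons]
    -- the effective bound min(deadline, time)
    have hm : min (PySem.List.pyGetD t 1 0) time ≤ (s.length : Int) := hmle t (by simp)
    set m := min (PySem.List.pyGetD t 1 0) time with hmdef
    have hclen : (pvFree s).countP (fun x => decide (x < m)) ≤ (pvFree s).length :=
      List.countP_le_length
    have hbis : pvBisectB (pvFree s) m 0 (pvFree s).length =
        (pvFree s).countP (fun x => decide (x < m)) :=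
      pvBisectB_eq_countP (pvFree s) (pvFree_pairwise s) m 0 (pvFree s).length
        (by omega) hclen le_rfl
    have hrest : rest.Pairwise (fun a b => PySem.List.pyGetD b 2 0 ≤ PySem.List.pyGetD a 2 0) :=
      (List.pairwise_cons.mp hpw).2
    -- B's first step
    have hstep0 : (t :: rest).foldl (pvStepB time) (pvFree s, 0) =
        rest.foldl (pvStepB time) (pvStepB time (pvFree s, 0) t) := by simp
    by_cases hc0 : 0 < (pvFree s).countP (fun x => decide (x < m))
    · -- a slot is taken
      have hlt : (pvFree s).countP (fun x => decide (x < m)) - 1 < (pvFree s).length := by omega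
      have hscan := scan_some_of_countP_pos s m hm (by omega) hlt
      have hstep : pvStepB time (pvFree s, 0) t =
          ((pvFree s).eraseIdx ((pvFree s).countP (fun x => decide (x < m)) - 1),
            0 + PySem.List.pyGetD t 2 0) := by
        simp only [pvStepB, ← hmdef, hbis, if_pos hc0]
      have hfree' := pvFree_set s ((pvFree s).countP (fun x => decide (x < m)) - 1) hlt
      have hih := ih (s.set ((pvFree s)[(pvFree s).countP (fun x => decide (x < m)) - 1]'hlt).toNat 1) ht hrest (by
        intro u hu
        rw [List.length_set]
        exact hmle u (by simp [hu]))
      rw [hstep0, hstep, foldB_acc]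
      -- A side: scan finds the same slot, in whichever branch
      by_cases hdt : PySem.List.pyGetD t 1 0 ≤ time
      · have hmeq : m = PySem.List.pyGetD t 1 0 := by rw [hmdef]; omega
        rw [if_pos hdt,
          show (PySem.List.pyGetD t 1 0).toNat = m.toNat from by rw [hmeq]]
        simp only [hscan]
        rw [hih, hfree']
        omega
      · have hmeq : m = time := by rw [hmdef]; omega
        rw [if_neg hdt, show time.toNat = m.toNat from by rw [hmeq]]
        simp only [hscan]
        rw [hih, hfree']
        omega
    · -- no slot free below m
      have hscan := scan_none_of_countP_zero s m hm (by omega)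
      have hstep : pvStepB time (pvFree s, 0) t = (pvFree s, 0) := by
        simp only [pvStepB, ← hmdef, hbis, if_neg hc0]
      have hih := ih s ht hrest (fun u hu => hmle u (by simp [hu]))
      rw [hstep0, hstep]
      by_cases hdt : PySem.List.pyGetD t 1 0 ≤ time
      · have hmeq : m = PySem.List.pyGetD t 1 0 := by rw [hmdef]; omega
        rw [if_pos hdt,
          show (PySem.List.pyGetD t 1 0).toNat = m.toNat from by rw [hmeq]]
        simp only [hscan]
        exact hih
      · have hmeq : m = time := by rw [hmdef]; omega
        rw [if_neg hdt, show time.toNat = m.toNat from by rw [hmeq]]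
        simp only [hscan]
        exact hih

lemma jsA_sorted (tasks : List (List Int)) (time : Int) (s : List Int)
    (ht : time ≠ 0) (htk : tasks ≠ []) :
    job_sequencing_problem_greedy_rec_helper tasks time s =
      job_sequencing_problem_greedy_rec_helper
        (PySem.List.sorted tasks (fun x => PySem.List.pyGetD x 2 0) true) time s := by
  rw [job_sequencing_problem_greedy_rec_helper,
      job_sequencing_problem_greedy_rec_helper,
      dif_neg (by simp [ht, htk]),
      dif_neg (by simp [ht, PySem.List.sorted_eq_nil_iff, htk])]
  simp only [PySem.List.sorted_rev_sorted_rev]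

-- ===== VERDICT (by name: the statement is the Claim_ definition above) =====
theorem job_sequencing_problem_greedy_rec_helper_spec : Claim_equal_job_sequencing_problem_greedy_rec_helper := by
  intro tasks time schedule _ hPre
  unfold Spec_job_sequencing_problem_greedy_rec_helper
  by_cases ht : time = 0
  · rw [job_sequencing_problem_greedy_rec_helper, dif_pos (Or.inl ht),
      job_sequencing_problem_greedy_rec_helper_alt, if_pos ht]
  · by_cases htk : tasks = []
    · subst htk
      rw [job_sequencing_problem_greedy_rec_helper, dif_pos (Or.inr rfl),
        job_sequencing_problem_greedy_rec_helper_alt, if_neg ht]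
      rfl
    · have h3 : ∀ t ∈ tasks, min (PySem.List.pyGetD t 1 0) time ≤ (schedule.length : Int) := by
        rcases hPre with h | h | h
        · exact absurd h ht
        · exact absurd h htk
        · exact fun t htm => (h t htm).2
      rw [jsA_sorted tasks time schedule ht htk,
        core time _ schedule ht (PySem.List.sorted_pairwise_rev tasks _)
          (fun t htm => h3 t ((PySem.List.mem_sorted tasks _ true t).mp htm))]
      rw [job_sequencing_problem_greedy_rec_helper_alt, if_neg ht]
      rfl
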